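-- pv_equiv track=rewrite | github.com/sheilsplenbluli/csvwrangler | csvwrangler/flatten.py | flatten_many
-- ===== SOURCE A (Python) =====
-- from typing import List, Dict, Optional
--
-- def flatten_column(
--     rows: List[Dict[str, str]],
--     column: str,
--     delimiter: str = "|",
--     strip: bool = True,
-- ) -> List[Dict[str, str]]:
--     """Expand rows so each split value of *column* becomes its own row.
--
--     Rows where the column is empty or missing are passed through unchanged.
--     """
--     if not rows:
--         return []
--     result: List[Dict[str, str]] = []
--     for row in rows:
--         raw = row.get(column, "")
--         if not raw:
--             result.append(dict(row))
--             continue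
--         parts = raw.split(delimiter)
--         if strip:
--             parts = [p.strip() for p in parts]
--         parts = [p for p in parts if p] or [""]
--         for part in parts:
--             new_row = dict(row)
--             new_row[column] = part
--             result.append(new_row)
--     return result
--
-- def flatten_many(
--     rows: List[Dict[str, str]],
--     columns: List[str],
--     delimiter: str = "|",
--     strip: bool = True,
-- ) -> List[Dict[str, str]]:
--     """Apply flatten_column sequentially for each column in *columns*."""
--     for col in columns:
--         rows = flatten_column(rows, col, delimiter=delimiter, strip=strip)
--     return rows
-- ===== SOURCE B (Python) =====
-- from typing import List, Dict
--
--
-- def flatten_many(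
--     rows: List[Dict[str, str]],
--     columns: List[str],
--     delimiter: str = "|",
--     strip: bool = True,
-- ) -> List[Dict[str, str]]:
--     """Expand each row independently: stream every split fragment straight into the
--     next combination list (a length mark detects the all-fragments-dropped case)."""
--     out: List[Dict[str, str]] = []
--     for rec in rows:
--         combos = [dict(rec)]
--         for key in columns:
--             nxt: List[Dict[str, str]] = []
--             for c in combos:
--                 cell = c.get(key, "")
--                 if not cell:
--                     nxt.append(c)
--                     continue
--                 mark = len(nxt)
--                 for frag in cell.split(delimiter):
--                     if strip:
--                         frag = frag.strip()
--                     if frag: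
--                         nxt.append({**c, key: frag})
--                 if len(nxt) == mark:
--                     nxt.append({**c, key: ""})
--             combos = nxt
--         out += combos
--     return out
-- ===== Notes on version B (the rewrite author's own statement) =====
-- stated objective: faster
-- what changed: B replaces A's flatten_column passes (rebuilding the whole row list and re-copying every pass-through dict once per column) with a single per-row triple loop that streams each split fragment straight into the next combination list, copying a dict only when a fragment is actually assigned and using a length mark instead of the build-parts-then-or-[''] pipeline.
import Mathlib
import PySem

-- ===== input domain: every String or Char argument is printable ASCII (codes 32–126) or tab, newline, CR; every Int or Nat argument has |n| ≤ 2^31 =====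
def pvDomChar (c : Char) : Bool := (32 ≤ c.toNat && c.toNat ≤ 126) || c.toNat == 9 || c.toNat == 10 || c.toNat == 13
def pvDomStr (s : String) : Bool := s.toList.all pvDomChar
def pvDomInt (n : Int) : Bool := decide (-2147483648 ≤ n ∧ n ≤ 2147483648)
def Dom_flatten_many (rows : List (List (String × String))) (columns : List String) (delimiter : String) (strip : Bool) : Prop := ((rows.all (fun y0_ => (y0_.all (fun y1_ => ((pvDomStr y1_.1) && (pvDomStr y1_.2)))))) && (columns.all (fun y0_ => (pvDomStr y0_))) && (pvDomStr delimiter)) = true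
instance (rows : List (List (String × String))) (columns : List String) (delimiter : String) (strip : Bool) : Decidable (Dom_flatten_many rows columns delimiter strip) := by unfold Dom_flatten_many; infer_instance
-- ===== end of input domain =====

-- B replaces A's per-column whole-list passes with a per-row triple loop that streams
-- split fragments straight into the next combination list (alternative decomposition,
-- same asymptotic cost).


-- ===== PORT A =====
-- dict(row) copies are identity on immutable values; row.get / new_row[column]=part are Dict.getD / Dict.insert
def flatten_column (rows : List (List (String × String))) (column : String) (delimiter : String) (strip : Bool) : List (List (String × String)) :=
  if rows = [] then []
  else
    rows.foldl (fun result row =>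
      let raw := (PySem.Dict.mk row).getD column ""
      if raw = "" then result ++ [row]
      else
        let parts := (PySem.Str.split? raw delimiter).getD []   -- none only when delimiter = "": Python raises, excluded by Pre_
        let parts := if strip then parts.map (fun p => PySem.Str.strip p) else parts
        let filtered := parts.filter (fun p => decide (p ≠ ""))
        let parts := if filtered = [] then [""] else filtered
        result ++ parts.map (fun part => ((PySem.Dict.mk row).insert column part).items)) []

def flatten_many (rows : List (List (String × String))) (columns : List String) (delimiter : String) (strip : Bool) : List (List (String × String)) :=
  columns.foldl (fun rows col => flatten_column rows col delimiter strip) rows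

-- ===== PORT B =====
-- Source B's triple loop: per row, per column, per combination, streaming each split fragment
-- straight into the next list; the length mark detects the all-fragments-dropped case.
def flatten_many_alt (rows : List (List (String × String))) (columns : List String) (delimiter : String) (strip : Bool) : List (List (String × String)) :=
  rows.foldl (fun out rec_ =>
    out ++ columns.foldl (fun combos key =>
      combos.foldl (fun nxt c =>
        let d := PySem.Dict.mk c
        let cell := d.getD key ""
        if cell = "" then nxt ++ [c]
        else
          let mark := nxt.length
          -- split? is none only when delimiter = "": Python raises there, excluded by Pre_
          let nxt := ((PySem.Str.split? cell delimiter).getD []).foldl (fun nxt frag =>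
            let frag := if strip then PySem.Str.strip frag else frag
            if frag = "" then nxt else nxt ++ [(d.insert key frag).items]) nxt
          if nxt.length = mark then nxt ++ [(d.insert key "").items] else nxt) []) [rec_]) []

-- ===== PRECONDITION & SPEC =====
-- Pre_ excludes exactly the inputs where Python A raises: delimiter = "" with some row holding a
-- nonempty cell in some listed column makes raw.split("") raise ValueError.
def Pre_flatten_many (rows : List (List (String × String))) (columns : List String) (delimiter : String) (strip : Bool) : Prop :=
  delimiter ≠ "" ∨ ∀ row ∈ rows, ∀ col ∈ columns, (PySem.Dict.mk row).getD col "" = ""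
instance (rows : List (List (String × String))) (columns : List String) (delimiter : String) (strip : Bool) : Decidable (Pre_flatten_many rows columns delimiter strip) := by unfold Pre_flatten_many; infer_instance

def pvWitness_flatten_many : (List (List (String × String))) × List String × String × Bool :=
  ([[("a", "x|y"), ("b", "u")], [("b", " p | q ")]], ["a", "b"], "|", true)

def Spec_flatten_many (rows : List (List (String × String))) (columns : List String) (delimiter : String) (strip : Bool) (out : List (List (String × String))) : Prop := out = flatten_many_alt rows columns delimiter strip
instance (rows : List (List (String × String))) (columns : List String) (delimiter : String) (strip : Bool) (out : List (List (String × String))) : Decidable (Spec_flatten_many rows columns delimiter strip out) := by unfold Spec_flatten_many; infer_instance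

-- ===== CLAIM (what is proved, stated in full; the proofs are below) =====
def Claim_equal_flatten_many : Prop := ∀ (rows : List (List (String × String))) (columns : List String) (delimiter : String) (strip : Bool), Dom_flatten_many rows columns delimiter strip → Pre_flatten_many rows columns delimiter strip → Spec_flatten_many rows columns delimiter strip (flatten_many rows columns delimiter strip)

-- ===== LEMMAS AND PROOFS =====

-- Proof-only helper: A's per-row action for one column.
def pvStep (col delimiter : String) (strip : Bool) (row : List (String × String)) : List (List (String × String)) :=
  let raw := (PySem.Dict.mk row).getD col ""
  if raw = "" then [row]
  else
    let parts := (PySem.Str.split? raw delimiter).getD []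
    let parts := if strip then parts.map (fun p => PySem.Str.strip p) else parts
    let filtered := parts.filter (fun p => decide (p ≠ ""))
    let parts := if filtered = [] then [""] else filtered
    parts.map (fun part => ((PySem.Dict.mk row).insert col part).items)

-- Generic: a foldl whose step appends a per-element block is the flatMap of the blocks.
theorem foldl_step_flatMap {α β : Type} (g : List β → α → List β) (h : α → List β)
    (hg : ∀ a x, g a x = a ++ h x) : ∀ (l : List α) (init : List β),
    l.foldl g init = init ++ l.flatMap h := by
  intro l
  induction l with
  | nil => simp
  | cons x t ih => intro init; simp [hg, ih, List.append_assoc]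

-- A's flatten_column is the flatMap of pvStep.
theorem flatten_column_eq_flatMap (rows : List (List (String × String))) (col delimiter : String) (strip : Bool) :
    flatten_column rows col delimiter strip = rows.flatMap (pvStep col delimiter strip) := by
  have go := foldl_step_flatMap
    (fun result row =>
      let raw := (PySem.Dict.mk row).getD col ""
      if raw = "" then result ++ [row]
      else
        let parts := (PySem.Str.split? raw delimiter).getD []
        let parts := if strip then parts.map (fun p => PySem.Str.strip p) else parts
        let filtered := parts.filter (fun p => decide (p ≠ ""))
        let parts := if filtered = [] then [""] else filtered
        result ++ parts.map (fun part => ((PySem.Dict.mk row).insert col part).items))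
    (pvStep col delimiter strip)
    (by
      intro a x
      by_cases h : (PySem.Dict.mk x).getD col "" = "" <;> simp [pvStep, h])
  unfold flatten_column
  by_cases h : rows = []
  · simp [h]
  · rw [if_neg h]
    simpa using go rows []

-- B's innermost part loop appends exactly the strip-filter-map image of the fragments.
theorem parts_foldl_eq (f : String → String) (ins : String → List (String × String)) :
    ∀ (ps : List String) (acc : List (List (String × String))),
      ps.foldl (fun nxt part => if f part = "" then nxt else nxt ++ [ins (f part)]) acc
      = acc ++ ((ps.map f).filter (fun p => decide (p ≠ ""))).map ins := by
  intro ps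
  induction ps with
  | nil => intro acc; simp
  | cons p t ih =>
    intro acc
    by_cases h : f p = "" <;> simp [h, ih, List.append_assoc]

-- B's per-combination body appends exactly pvStep of the combination.
theorem body_eq (col delimiter : String) (strip : Bool)
    (nxt : List (List (String × String))) (c : List (String × String)) :
    (let raw := (PySem.Dict.mk c).getD col ""
     if raw = "" then nxt ++ [c]
     else
       let mark := nxt.length
       let nxt := ((PySem.Str.split? raw delimiter).getD []).foldl (fun nxt part =>
         let part := if strip then PySem.Str.strip part else part
         if part = "" then nxt else nxt ++ [((PySem.Dict.mk c).insert col part).items]) nxt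
       if nxt.length = mark then nxt ++ [((PySem.Dict.mk c).insert col "").items] else nxt)
    = nxt ++ pvStep col delimiter strip c := by
  by_cases h : (PySem.Dict.mk c).getD col "" = ""
  · simp [pvStep, h]
  · have hmap : ∀ ps : List String,
        ps.map (fun part => if strip then PySem.Str.strip part else part)
        = if strip then ps.map (fun p => PySem.Str.strip p) else ps := by
      intro ps; cases strip <;> simp
    have hfold := parts_foldl_eq (fun part => if strip then PySem.Str.strip part else part)
      (fun p => ((PySem.Dict.mk c).insert col p).items)
      ((PySem.Str.split? ((PySem.Dict.mk c).getD col "") delimiter).getD []) nxt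
    simp only [hmap] at hfold
    simp only [h, pvStep, hfold]
    set kept := ((if strip then
        ((PySem.Str.split? ((PySem.Dict.mk c).getD col "") delimiter).getD []).map
          (fun p => PySem.Str.strip p)
      else ((PySem.Str.split? ((PySem.Dict.mk c).getD col "") delimiter).getD [])).filter
        (fun p => decide (p ≠ ""))) with hk
    by_cases hke : kept = []
    · simp [hke]
    · simp [hke]

-- Column passes commute with per-row grouping: folding the columns over the whole list
-- equals expanding every row independently and concatenating the blocks.
theorem foldl_flatMap_comm (cols : List String) (delimiter : String) (strip : Bool) :
    ∀ rows : List (List (String × String)),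
      cols.foldl (fun rs c => rs.flatMap (pvStep c delimiter strip)) rows
      = rows.flatMap (fun r => cols.foldl (fun cs c => cs.flatMap (pvStep c delimiter strip)) [r]) := by
  induction cols with
  | nil => intro rows; simp
  | cons c t ih =>
    intro rows
    simp only [List.foldl_cons]
    rw [ih (rows.flatMap (pvStep c delimiter strip)), List.flatMap_assoc]
    refine congrArg (fun f => List.flatMap f rows) (funext fun r => ?_)
    rw [← ih (pvStep c delimiter strip r)]
    simp

-- B computes the per-row column fold of pvStep blocks.
theorem flatten_many_alt_eq (rows : List (List (String × String))) (columns : List String) (delimiter : String) (strip : Bool) :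
    flatten_many_alt rows columns delimiter strip
    = rows.flatMap (fun r => columns.foldl (fun cs c => cs.flatMap (pvStep c delimiter strip)) [r]) := by
  unfold flatten_many_alt
  have hinner : (fun (combos : List (List (String × String))) (col : String) =>
      combos.foldl (fun nxt c =>
        let raw := (PySem.Dict.mk c).getD col ""
        if raw = "" then nxt ++ [c]
        else
          let mark := nxt.length
          let nxt := ((PySem.Str.split? raw delimiter).getD []).foldl (fun nxt part =>
            let part := if strip then PySem.Str.strip part else part
            if part = "" then nxt else nxt ++ [((PySem.Dict.mk c).insert col part).items]) nxt
          if nxt.length = mark then nxt ++ [((PySem.Dict.mk c).insert col "").items] else nxt) [])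
      = fun combos col => combos.flatMap (pvStep col delimiter strip) := by
    funext combos col
    simpa using foldl_step_flatMap _ (pvStep col delimiter strip)
      (fun a x => body_eq col delimiter strip a x) combos []
  rw [hinner]
  simpa using foldl_step_flatMap _
    (fun row => columns.foldl (fun cs c => cs.flatMap (pvStep c delimiter strip)) [row])
    (fun a x => rfl) rows []

-- A is the column fold of pvStep passes over the whole list.
theorem flatten_many_eq (rows : List (List (String × String))) (columns : List String) (delimiter : String) (strip : Bool) :
    flatten_many rows columns delimiter strip
    = columns.foldl (fun rs c => rs.flatMap (pvStep c delimiter strip)) rows := by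
  unfold flatten_many
  have : (fun (rs : List (List (String × String))) (col : String) => flatten_column rs col delimiter strip)
      = fun rs c => rs.flatMap (pvStep c delimiter strip) := by
    funext rs c; exact flatten_column_eq_flatMap rs c delimiter strip
  rw [this]

-- ===== VERDICT (by name: the statement is the Claim_ definition above) =====
theorem flatten_many_spec : Claim_equal_flatten_many := by
  intro rows columns delimiter strip _ _
  unfold Spec_flatten_many
  rw [flatten_many_alt_eq, ← foldl_flatMap_comm, flatten_many_eq]
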